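-- pv_equiv track=rewrite | github.com/YuchenHHH/portsentinel-ai-assistant | trans.py | parse_sop_section
-- ===== SOURCE A (Python) =====
-- from typing import List, Dict, Optional
--
-- def normalize_module(module_field: Optional[str]) -> str:
--     """
--     直接使用表格中的 Module 字段值作为模块名称。
--     如果为空或无效，返回 "Unknown"。
--     """
--     if not module_field:
--         return "Unknown"
--
--     # 清理并返回模块字段的值
--     module_cleaned = module_field.strip()
--
--     if not module_cleaned:
--         return "Unknown"
--
--     return module_cleaned
--
-- def parse_sop_section(sop_text: str) -> Dict[str, Optional[str]]:
--     """
--     将单个 SOP 文本块解析为包含标题和标准部分的字典。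
--     """
--     sop_data = {
--         "Title": None,
--         "Overview": None,
--         "Preconditions": None,
--         "Resolution": None,
--         "Verification": None,
--         "Module": None
--     }
--     raw_lines = sop_text.split('\n')
--     lines = [line.rstrip() for line in raw_lines]
--     stripped_lines = [line.strip() for line in lines]
--     if not any(stripped_lines):
--         return sop_data
--
--     section_positions = {}
--     for idx, value in enumerate(stripped_lines):
--         lower_value = value.lower()
--         if lower_value == "module":
--             section_positions["Module"] = idx
--         elif lower_value == "overview":
--             section_positions["Overview"] = idx
--         elif lower_value == "preconditions":
--             section_positions["Preconditions"] = idx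
--         elif lower_value == "resolution":
--             section_positions["Resolution"] = idx
--         elif lower_value == "verification":
--             section_positions["Verification"] = idx
--
--     module_idx = section_positions.get("Module")
--     if module_idx is not None:
--         title_lines = [stripped_lines[i] for i in range(module_idx) if stripped_lines[i]]
--         title = " ".join(title_lines).strip()
--     else:
--         title = stripped_lines[0] if stripped_lines else None
--     sop_data["Title"] = title or None
--
--     def extract_section(label: str) -> Optional[str]:
--         start_idx = section_positions.get(label)
--         if start_idx is None:
--             return None
--         subsequent_indices = [
--             section_positions[key]
--             for key in ["Module", "Overview", "Preconditions", "Resolution", "Verification"]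
--             if key in section_positions and section_positions[key] > start_idx
--         ]
--         end_idx = min(subsequent_indices) if subsequent_indices else len(lines)
--         content = [
--             lines[i].strip()
--             for i in range(start_idx + 1, end_idx)
--             if lines[i].strip()
--         ]
--         return "\n".join(content).strip() if content else None
--
--     module_field = extract_section("Module")
--     sop_data["Module"] = normalize_module(module_field)
--     sop_data["Overview"] = extract_section("Overview")
--     sop_data["Preconditions"] = extract_section("Preconditions")
--     sop_data["Resolution"] = extract_section("Resolution")
--     sop_data["Verification"] = extract_section("Verification")
--
--     return sop_data
-- ===== SOURCE B (Python) =====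
-- HEADERS = {"module": "Module", "overview": "Overview", "preconditions": "Preconditions",
--            "resolution": "Resolution", "verification": "Verification"}
--
-- def parse_sop_section(sop_text):
--     # single forward pass: a state machine over the stripped lines
--     sections = {}
--     current = None
--     buf = []
--     seen = []
--     title = None
--     for raw in sop_text.split('\n'):
--         line = raw.strip()
--         label = HEADERS.get(line.lower())
--         if label is not None:
--             if current is not None:
--                 sections[current] = buf
--             if label == "Module":
--                 title = " ".join(seen)
--             current = label
--             buf = []
--         elif line and current is not None:
--             buf.append(line)
--         if line:
--             seen.append(line)
--     if current is not None:
--         sections[current] = buf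
--     if not seen:
--         return {"Title": None, "Overview": None, "Preconditions": None,
--                 "Resolution": None, "Verification": None, "Module": None}
--     if title is None:
--         title = sop_text.split('\n')[0].strip()
--
--     def sect(label):
--         content = sections.get(label)
--         return "\n".join(content) if content else None
--
--     return {"Title": title or None,
--             "Overview": sect("Overview"),
--             "Preconditions": sect("Preconditions"),
--             "Resolution": sect("Resolution"),
--             "Verification": sect("Verification"),
--             "Module": sect("Module") or "Unknown"}
-- ===== Notes on version B (the rewrite author's own statement) =====
-- stated objective: alternative
-- what changed: B replaces A's two-stage scheme (build a per-label position index, then for each label re-scan the position table for the minimal later header and slice that index range out of the line list) by a single forward state-machine pass that never computes positions: it keeps the current section's buffer, commits it when the next header line arrives, and snapshots the running non-empty-line list as the title at a Module header.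
import Mathlib
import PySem

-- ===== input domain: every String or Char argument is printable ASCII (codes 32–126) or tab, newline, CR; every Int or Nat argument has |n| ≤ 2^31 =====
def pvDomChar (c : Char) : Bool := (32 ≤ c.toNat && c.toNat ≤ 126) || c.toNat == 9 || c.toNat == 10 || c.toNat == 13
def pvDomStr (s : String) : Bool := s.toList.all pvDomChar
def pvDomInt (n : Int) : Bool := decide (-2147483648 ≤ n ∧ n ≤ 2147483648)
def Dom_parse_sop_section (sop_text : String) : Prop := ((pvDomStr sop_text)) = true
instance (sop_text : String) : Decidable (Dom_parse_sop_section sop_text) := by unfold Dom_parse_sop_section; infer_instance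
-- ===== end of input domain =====

-- B replaces A's position-index-then-slice scheme by a single forward state-machine pass over the
-- stripped lines (commit the current section's buffer at each header, snapshot the title at a
-- Module header); objective: alternative.


-- ===== PORT A =====

def normalize_module (module_field : Option String) : String :=
  match module_field with
  | none => "Unknown"
  | some s =>
    if s = "" then "Unknown"
    else
      if PySem.Str.strip s = "" then "Unknown" else PySem.Str.strip s

-- the `for idx, value in enumerate(stripped_lines)` loop that fills section_positions
def pvPositions (stripped_lines : List String) : PySem.Dict String Int :=
  (PySem.List.enumerate stripped_lines).foldl
    (fun d p =>
      if PySem.Str.lower p.2 = "module" then d.insert "Module" p.1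
      else if PySem.Str.lower p.2 = "overview" then d.insert "Overview" p.1
      else if PySem.Str.lower p.2 = "preconditions" then d.insert "Preconditions" p.1
      else if PySem.Str.lower p.2 = "resolution" then d.insert "Resolution" p.1
      else if PySem.Str.lower p.2 = "verification" then d.insert "Verification" p.1
      else d)
    PySem.Dict.empty

def pvHK : List String := ["Module", "Overview", "Preconditions", "Resolution", "Verification"]

-- the nested helper `extract_section` (closure over lines and section_positions)
def pvExtractSection (lines : List String) (positions : PySem.Dict String Int)
    (label : String) : Option String :=
  match positions.get? label with
  | none => none
  | some start_idx =>
    let subsequent :=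
      pvHK.filterMap
        (fun key =>
          match positions.get? key with
          | some p => if start_idx < p then some p else none
          | none => none)
    -- `min(subsequent_indices) if subsequent_indices else len(lines)`: min? is none iff empty
    let end_idx : Int :=
      (PySem.List.min? subsequent (fun x => x)).getD (lines.length : Int)
    let content := (PySem.List.pyRange (start_idx + 1) end_idx).filterMap
      (fun i =>
        if PySem.Str.strip (PySem.List.pyGetD lines i "") = "" then none
        else some (PySem.Str.strip (PySem.List.pyGetD lines i "")))
    if content.isEmpty then none else some (PySem.Str.strip (PySem.Str.join "\n" content))

def parse_sop_section (sop_text : String) : List (String × Option String) :=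
  let sop_data : PySem.Dict String (Option String) :=
    ((((((PySem.Dict.empty.insert "Title" none).insert "Overview" none).insert
        "Preconditions" none).insert "Resolution" none).insert "Verification" none).insert
        "Module" none)
  -- split('\n'): the separator is nonempty, so split? never raises
  let raw_lines := (PySem.Str.split? sop_text "\n").getD []
  let lines := raw_lines.map PySem.Str.rstrip
  let stripped_lines := lines.map PySem.Str.strip
  if !stripped_lines.any (fun s => !(s == "")) then sop_data.items
  else
    let section_positions := pvPositions stripped_lines
    let title? : Option String :=
      match section_positions.get? "Module" with
      | some module_idx =>
        some (PySem.Str.strip (PySem.Str.join " "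
          ((PySem.List.pyRange 0 module_idx).filterMap
            (fun i =>
              if PySem.List.pyGetD stripped_lines i "" = "" then none
              else some (PySem.List.pyGetD stripped_lines i "")))))
      | none =>
        if stripped_lines.isEmpty then none
        else some (PySem.List.pyGetD stripped_lines 0 "")
    let title : Option String :=
      match title? with
      | some t => if t = "" then none else some t
      | none => none
    let module_field := pvExtractSection lines section_positions "Module"
    (((((((sop_data.insert "Title" title).insert "Module"
        (some (normalize_module module_field))).insert "Overview"
        (pvExtractSection lines section_positions "Overview")).insert "Preconditions"
        (pvExtractSection lines section_positions "Preconditions")).insert "Resolution"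
        (pvExtractSection lines section_positions "Resolution")).insert "Verification"
        (pvExtractSection lines section_positions "Verification"))).items

-- ===== PORT B =====

-- the module-level HEADERS table
def pvHEADERS : PySem.Dict String String :=
  ((((PySem.Dict.empty.insert "module" "Module").insert "overview" "Overview").insert
      "preconditions" "Preconditions").insert "resolution" "Resolution").insert
      "verification" "Verification"

-- the loop state of Source B: current section, committed sections, current buffer,
-- non-empty lines seen so far, title snapshot
structure PvState where
  current : Option String
  sections : PySem.Dict String (List String)
  buf : List String
  seen : List String
  title : Option String

-- one loop iteration, after `line = raw.strip()` (`label is not None` / `current is not None`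
-- tests rendered with Option.elim)
def pvStepLine (st : PvState) (line : String) : PvState :=
  (pvHEADERS.get? (PySem.Str.lower line)).elim
    { st with
      buf := if !(line == "") && st.current.isSome then st.buf ++ [line] else st.buf
      seen := if line == "" then st.seen else st.seen ++ [line] }
    (fun label =>
      { current := some label
        sections := st.current.elim st.sections (fun c => st.sections.insert c st.buf)
        buf := []
        seen := if line == "" then st.seen else st.seen ++ [line]
        title := if label == "Module" then some (PySem.Str.join " " st.seen) else st.title })

-- one loop iteration over the raw line (`line = raw.strip()` then the body)
def pvStep (st : PvState) (raw : String) : PvState := pvStepLine st (PySem.Str.strip raw)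

def pvInit : PvState := ⟨none, PySem.Dict.empty, [], [], none⟩

def parse_sop_section_alt (sop_text : String) : List (String × Option String) :=
  let raws := (PySem.Str.split? sop_text "\n").getD []
  let st := raws.foldl pvStep pvInit
  -- the trailing `if current is not None: sections[current] = buf`
  let sections := st.current.elim st.sections (fun c => st.sections.insert c st.buf)
  if st.seen.isEmpty then
    [("Title", none), ("Overview", none), ("Preconditions", none), ("Resolution", none),
     ("Verification", none), ("Module", none)]
  else
    -- `if title is None: title = sop_text.split('\\n')[0].strip()`
    let title := st.title.getD (PySem.Str.strip (PySem.List.pyGetD raws 0 ""))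
    -- `"\\n".join(content) if content else None` (None and [] are both falsy)
    let sect := fun (label : String) =>
      let content := (sections.get? label).getD []
      if content.isEmpty then none else some (PySem.Str.join "\n" content)
    [("Title", if title = "" then none else some title),
     ("Overview", sect "Overview"),
     ("Preconditions", sect "Preconditions"),
     ("Resolution", sect "Resolution"),
     ("Verification", sect "Verification"),
     -- `sect("Module") or "Unknown"` (None and "" are both falsy)
     ("Module", some (if ((sect "Module").getD "") = "" then "Unknown"
        else (sect "Module").getD ""))]

-- ===== PRECONDITION & SPEC =====

def pvStrippedLower (sop_text : String) : List String :=
  ((PySem.Str.split? sop_text "\n").getD []).map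
    (fun l => PySem.Str.lower (PySem.Str.strip l))

-- Pre_ excludes texts in which some section-header word occurs on more than one line: there A's
-- last-occurrence position table turns earlier header lines into ordinary content of other
-- sections, a corner with several equally defensible behaviours; B keeps the straightforward one.
def Pre_parse_sop_section (sop_text : String) : Prop :=
  ∀ w ∈ ["module", "overview", "preconditions", "resolution", "verification"],
    (pvStrippedLower sop_text).count w ≤ 1

instance (sop_text : String) : Decidable (Pre_parse_sop_section sop_text) := by
  unfold Pre_parse_sop_section; infer_instance

def pvWitness_parse_sop_section : String := "Net SOP\nModule\nnetwork\nOverview\nsteps here"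

def Spec_parse_sop_section (sop_text : String) (out : List (String × Option String)) : Prop :=
  out = parse_sop_section_alt sop_text

instance (sop_text : String) (out : List (String × Option String)) :
    Decidable (Spec_parse_sop_section sop_text out) := by
  unfold Spec_parse_sop_section; infer_instance

-- ===== CLAIM (what is proved, stated in full; the proofs are below) =====
def Claim_equal_parse_sop_section : Prop :=
  ∀ (sop_text : String), Dom_parse_sop_section sop_text → Pre_parse_sop_section sop_text →
    Spec_parse_sop_section sop_text (parse_sop_section sop_text)

-- ===== LEMMAS AND PROOFS =====

-- ---- strip machinery (Chars level) ----

theorem pv_rstrip_append (x y : List Char) :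
    PySem.Chars.rstrip (x ++ y) =
      if PySem.Chars.rstrip y = [] then PySem.Chars.rstrip x else x ++ PySem.Chars.rstrip y := by
  simp only [PySem.Chars.rstrip]
  rw [List.reverse_append, List.dropWhile_append]
  by_cases h : List.dropWhile PySem.Chars.isspace y.reverse = []
  · simp [h]
  · rw [if_neg (by simpa [List.isEmpty_iff] using h),
      if_neg (by simpa [List.reverse_eq_nil_iff] using h), List.reverse_append,
      List.reverse_reverse]

theorem pv_rstrip_singleton (c : Char) :
    PySem.Chars.rstrip [c] = if PySem.Chars.isspace c then [] else [c] := by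
  by_cases h : PySem.Chars.isspace c <;>
    simp [PySem.Chars.rstrip, List.dropWhile, h]

theorem pv_rstrip_cons (c : Char) (t : List Char) :
    PySem.Chars.rstrip (c :: t) =
      if PySem.Chars.rstrip t = [] then (if PySem.Chars.isspace c then [] else [c])
      else c :: PySem.Chars.rstrip t := by
  have h := pv_rstrip_append [c] t
  simpa [pv_rstrip_singleton] using h

theorem pv_lstrip_idem (s : List Char) :
    PySem.Chars.lstrip (PySem.Chars.lstrip s) = PySem.Chars.lstrip s := by
  induction s with
  | nil => rfl
  | cons c t ih =>
    by_cases h : PySem.Chars.isspace c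
    · simpa [PySem.Chars.lstrip, List.dropWhile_cons, h] using ih
    · simp [PySem.Chars.lstrip, List.dropWhile_cons, h]

theorem pv_rstrip_idem (s : List Char) :
    PySem.Chars.rstrip (PySem.Chars.rstrip s) = PySem.Chars.rstrip s := by
  have h := pv_lstrip_idem s.reverse
  simp only [PySem.Chars.lstrip] at h
  simp [PySem.Chars.rstrip, List.reverse_reverse, h]

theorem pv_lstrip_rstrip_comm (s : List Char) :
    PySem.Chars.lstrip (PySem.Chars.rstrip s) = PySem.Chars.rstrip (PySem.Chars.lstrip s) := by
  induction s with
  | nil => rfl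
  | cons c t ih =>
    have hl : ∀ (u : List Char) (c : Char), PySem.Chars.isspace c = true →
        PySem.Chars.lstrip (c :: u) = PySem.Chars.lstrip u := by
      intro u c h; simp [PySem.Chars.lstrip, List.dropWhile_cons, h]
    have hl2 : ∀ (u : List Char) (c : Char), PySem.Chars.isspace c = false →
        PySem.Chars.lstrip (c :: u) = c :: u := by
      intro u c h; simp [PySem.Chars.lstrip, List.dropWhile_cons, h]
    by_cases h : PySem.Chars.isspace c
    · rw [hl t c h, pv_rstrip_cons]
      by_cases h2 : PySem.Chars.rstrip t = []
      · rw [if_pos h2, if_pos h, ← ih, h2]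
      · rw [if_neg h2, hl _ c h, ih]
    · rw [hl2 t c (by simpa using h), pv_rstrip_cons]
      by_cases h2 : PySem.Chars.rstrip t = []
      · rw [if_pos h2, if_neg h]
        exact hl2 [] c (by simpa using h)
      · rw [if_neg h2]
        exact hl2 _ c (by simpa using h)

theorem pv_strip_rstrip_chars (s : List Char) :
    PySem.Chars.strip (PySem.Chars.rstrip s) = PySem.Chars.strip s := by
  simp only [PySem.Chars.strip]
  rw [pv_lstrip_rstrip_comm, pv_rstrip_idem]

theorem pv_strip_idem_chars (s : List Char) :
    PySem.Chars.strip (PySem.Chars.strip s) = PySem.Chars.strip s := by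
  simp only [PySem.Chars.strip]
  rw [pv_lstrip_rstrip_comm, pv_rstrip_idem, pv_lstrip_idem]

theorem pv_stripfix (s : List Char) (h : PySem.Chars.strip s = s) :
    PySem.Chars.lstrip s = s ∧ PySem.Chars.rstrip s = s := by
  have hs : PySem.Chars.rstrip (PySem.Chars.lstrip s) = s := by
    simpa [PySem.Chars.strip] using h
  constructor
  · conv_lhs => rw [← hs]
    rw [pv_lstrip_rstrip_comm, pv_lstrip_idem, hs]
  · conv_lhs => rw [← hs]
    rw [pv_rstrip_idem, hs]

theorem pv_lstrip_append_fix (q z : List Char) (hq : q ≠ [])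
    (h : PySem.Chars.lstrip q = q) : PySem.Chars.lstrip (q ++ z) = q ++ z := by
  simp only [PySem.Chars.lstrip] at h ⊢
  rw [List.dropWhile_append, h]
  rw [if_neg (by simpa [List.isEmpty_iff] using hq)]

theorem pv_join_ne_nil_chars (sep x : List Char) (rest : List (List Char)) (hx : x ≠ []) :
    PySem.Chars.join sep (x :: rest) ≠ [] := by
  cases rest with
  | nil => simpa [PySem.Chars.join_singleton] using hx
  | cons r rs => simp [PySem.Chars.join_cons_cons, hx]

theorem pv_rstrip_join_chars (sep : List Char) (parts : List (List Char))
    (h : ∀ x ∈ parts, x ≠ [] ∧ PySem.Chars.rstrip x = x) :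
    PySem.Chars.rstrip (PySem.Chars.join sep parts) = PySem.Chars.join sep parts := by
  induction parts with
  | nil => rfl
  | cons q rest ih =>
    cases rest with
    | nil =>
      rw [PySem.Chars.join_singleton]
      exact (h q (by simp)).2
    | cons r rs =>
      have hrj : PySem.Chars.rstrip (PySem.Chars.join sep (r :: rs))
          = PySem.Chars.join sep (r :: rs) := ih (fun x hx => h x (by simp [hx]))
      have hne : PySem.Chars.join sep (r :: rs) ≠ [] :=
        pv_join_ne_nil_chars sep r rs (h r (by simp)).1
      have h1 : PySem.Chars.rstrip (sep ++ PySem.Chars.join sep (r :: rs))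
          = sep ++ PySem.Chars.join sep (r :: rs) := by
        rw [pv_rstrip_append, hrj, if_neg hne]
      rw [PySem.Chars.join_cons_cons, List.append_assoc, pv_rstrip_append, h1,
        if_neg (by simp [hne]), ← List.append_assoc]

theorem pv_strip_join_chars (sep : List Char) (parts : List (List Char))
    (h : ∀ x ∈ parts, x ≠ [] ∧ PySem.Chars.strip x = x) :
    PySem.Chars.strip (PySem.Chars.join sep parts) = PySem.Chars.join sep parts := by
  cases parts with
  | nil => rfl
  | cons q rest =>
    have hfix : ∀ x ∈ q :: rest, PySem.Chars.lstrip x = x ∧ PySem.Chars.rstrip x = x :=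
      fun x hx => pv_stripfix x (h x hx).2
    have hl : PySem.Chars.lstrip (PySem.Chars.join sep (q :: rest))
        = PySem.Chars.join sep (q :: rest) := by
      cases rest with
      | nil =>
        rw [PySem.Chars.join_singleton]
        exact (hfix q (by simp)).1
      | cons r rs =>
        rw [PySem.Chars.join_cons_cons, List.append_assoc]
        exact pv_lstrip_append_fix q _ (h q (by simp)).1 (hfix q (by simp)).1
    have hr := pv_rstrip_join_chars sep (q :: rest)
      (fun x hx => ⟨(h x hx).1, (hfix x hx).2⟩)
    simp only [PySem.Chars.strip]
    rw [hl, hr]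

-- ---- strip machinery (String level) ----

theorem pv_toList_eq_nil (s : String) (h : s.toList = []) : s = "" := by
  have := congrArg String.ofList h
  rwa [String.ofList_toList] at this

theorem pvStr_strip_rstrip (s : String) :
    PySem.Str.strip (PySem.Str.rstrip s) = PySem.Str.strip s := by
  simp only [PySem.Str.strip, PySem.Str.rstrip, String.toList_ofList]
  rw [pv_strip_rstrip_chars]

theorem pvStr_strip_idem (s : String) :
    PySem.Str.strip (PySem.Str.strip s) = PySem.Str.strip s := by
  simp only [PySem.Str.strip, String.toList_ofList]
  rw [pv_strip_idem_chars]

theorem pvStr_join_ne_empty (sep x : String) (rest : List String) (hx : x ≠ "") :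
    PySem.Str.join sep (x :: rest) ≠ "" := by
  intro hEq
  have hx' : x.toList ≠ [] := fun hh => hx (pv_toList_eq_nil x hh)
  have h2 := congrArg String.toList hEq
  simp only [PySem.Str.join, String.toList_ofList, List.map_cons] at h2
  exact pv_join_ne_nil_chars sep.toList x.toList _ hx' (by simpa using h2)

theorem pvStr_strip_join (sep : String) (parts : List String)
    (h : ∀ x ∈ parts, x ≠ "" ∧ PySem.Str.strip x = x) :
    PySem.Str.strip (PySem.Str.join sep parts) = PySem.Str.join sep parts := by
  have h' : ∀ y ∈ parts.map String.toList, y ≠ [] ∧ PySem.Chars.strip y = y := by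
    intro y hy
    obtain ⟨x, hx, rfl⟩ := List.mem_map.mp hy
    refine ⟨fun hh => (h x hx).1 (pv_toList_eq_nil x hh), ?_⟩
    have h2 := congrArg String.toList (h x hx).2
    simpa [PySem.Str.strip, String.toList_ofList] using h2
  simp only [PySem.Str.strip, PySem.Str.join, String.toList_ofList]
  rw [pv_strip_join_chars sep.toList (parts.map String.toList) h']

-- ---- generic list lemmas ----

theorem pv_foldl_filterMap {α β δ : Type} (f : α → Option β) (g : δ → β → δ) :
    ∀ (l : List α) (d : δ),
      l.foldl (fun d x => match f x with | some y => g d y | none => d) d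
        = (l.filterMap f).foldl g d := by
  intro l
  induction l with
  | nil => intro d; rfl
  | cons x t ih =>
    intro d
    cases hfx : f x <;> simp [List.filterMap_cons, List.foldl_cons, hfx, ih]

theorem pv_count_filterMap {α β : Type} [BEq β] [LawfulBEq β] (f : α → Option β)
    (l : List α) (b : β) :
    (l.filterMap f).count b = l.countP (fun x => f x == some b) := by
  induction l with
  | nil => simp
  | cons x t ih =>
    cases hfx : f x with
    | none => simp [List.filterMap_cons, hfx, List.countP_cons, ih]
    | some y =>
      by_cases hy : y = b
      · subst hy
        simp [List.filterMap_cons, hfx, List.count_cons, List.countP_cons, ih]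
      · simp [List.filterMap_cons, hfx, List.count_cons, List.countP_cons, ih, hy]

theorem pv_min?_int (l : List Int) : PySem.List.min? l (fun x => x) = l.min? := by
  have aux : ∀ (f : Option Int → Int → Option Int),
      (∀ (a x : Int), f (some a) x = if x < a then some x else some a) →
      ∀ (t : List Int) (a : Int), t.foldl f (some a) = some (t.foldl min a) := by
    intro f hf t
    induction t with
    | nil => intro a; rfl
    | cons x u ih =>
      intro a
      have hm : (if x < a then some x else some a) = some (min a x) := by
        rcases lt_or_ge x a with h | h
        · rw [if_pos h, min_eq_right (le_of_lt h)]
        · rw [if_neg (not_lt.mpr h), min_eq_left h]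
      simp only [List.foldl_cons, hf, hm]
      exact ih (min a x)
  cases l with
  | nil => rfl
  | cons a t =>
    simp only [PySem.List.min?, List.foldl_cons]
    rw [List.min?_cons']
    exact aux _ (fun _ _ => rfl) t a

-- ---- enumerate ----

theorem pv_length_enumerate {α : Type} (l : List α) (s : Int) :
    (PySem.List.enumerate l s).length = l.length := by
  induction l generalizing s with
  | nil => rfl
  | cons x t ih => simp [PySem.List.enumerate, ih]

theorem pv_getElem_enumerate {α : Type} (l : List α) (s : Int) (j : Nat) (h : j < l.length) :
    (PySem.List.enumerate l s)[j]'(by rw [pv_length_enumerate]; exact h) = (s + j, l[j]) := by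
  induction l generalizing s j with
  | nil => exact absurd h (Nat.not_lt_zero j)
  | cons x t ih =>
    cases j with
    | zero => simp [PySem.List.enumerate]
    | succ j =>
      have hj : j < t.length := by simpa using h
      have hcons : PySem.List.enumerate (x :: t) s = (s, x) :: PySem.List.enumerate t (s + 1) := by
        simp [PySem.List.enumerate]
      simp only [hcons, List.getElem_cons_succ]
      rw [ih (s + 1) j hj]
      have hsj : s + 1 + (j : Int) = s + ((j + 1 : Nat) : Int) := by push_cast; ring
      rw [hsj]

theorem pv_enum_map_snd {α : Type} (l : List α) (s : Int) :
    (PySem.List.enumerate l s).map (·.2) = l := by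
  induction l generalizing s with
  | nil => rfl
  | cons x t ih => simp [PySem.List.enumerate, ih]

theorem pv_enumerate_append {α : Type} (p : List α) (x : α) : ∀ s : Int,
    PySem.List.enumerate (p ++ [x]) s = PySem.List.enumerate p s ++ [(s + (p.length : Int), x)] := by
  induction p with
  | nil => intro s; simp [PySem.List.enumerate]
  | cons y t ih =>
    intro s
    have harith : s + 1 + (t.length : Int) = s + ((t.length + 1 : Nat) : Int) := by
      push_cast; ring
    simp only [List.cons_append, PySem.List.enumerate, ih (s + 1), List.length_cons, harith]

-- ---- header events (proof-side view shared by both ports) ----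

-- header events (index, canonical label) in textual order
def pvEvents (stripped : List String) : List (Int × String) :=
  (PySem.List.enumerate stripped).filterMap
    (fun p => (pvHEADERS.get? (PySem.Str.lower p.2)).map (fun lab => (p.1, lab)))

-- each section ends where the next header event begins (last one at end of text)
def pvEnds (stripped : List String) : List Int :=
  ((pvEvents stripped).drop 1).map (·.1) ++ [(stripped.length : Int)]

-- the non-empty lines strictly between positions a and b
def pvContent (stripped : List String) (a b : Int) : List String :=
  (PySem.List.slice stripped (some (a + 1)) (some b)).filter (fun s => !(s == ""))

def pvVal (stripped : List String) (pe : (Int × String) × Int) : Option String :=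
  let content := pvContent stripped pe.1.1 pe.2
  if content.isEmpty then none else some (PySem.Str.join "\n" content)

def pvSections (stripped : List String) : PySem.Dict String (Option String) :=
  ((pvEvents stripped).zip (pvEnds stripped)).foldl
    (fun d pe => d.insert pe.1.2 (pvVal stripped pe)) PySem.Dict.empty

-- the title: everything before the Module header (or the first line if there is none)
def pvTitle (stripped : List String) : String :=
  match (((pvEvents stripped).find? (fun e => e.2 == "Module")).map (fun e => e.1) : Option Int) with
  | none => PySem.List.pyGetD stripped 0 ""
  | some mi =>
    PySem.Str.join " " ((PySem.List.slice stripped none (some mi)).filter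
      (fun s => !(s == "")))

theorem pv_get?_HEADERS (lv : String) :
    pvHEADERS.get? lv =
      if lv = "module" then some "Module"
      else if lv = "overview" then some "Overview"
      else if lv = "preconditions" then some "Preconditions"
      else if lv = "resolution" then some "Resolution"
      else if lv = "verification" then some "Verification"
      else none := by
  have hit : pvHEADERS.items = [("module", "Module"), ("overview", "Overview"),
      ("preconditions", "Preconditions"), ("resolution", "Resolution"),
      ("verification", "Verification")] := rfl
  by_cases h1 : lv = "module"
  · subst h1; rfl
  by_cases h2 : lv = "overview"
  · subst h2; rfl
  by_cases h3 : lv = "preconditions"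
  · subst h3; rfl
  by_cases h4 : lv = "resolution"
  · subst h4; rfl
  by_cases h5 : lv = "verification"
  · subst h5; rfl
  have e1 : ("module" == lv) = false := beq_eq_false_iff_ne.mpr (Ne.symm h1)
  have e2 : ("overview" == lv) = false := beq_eq_false_iff_ne.mpr (Ne.symm h2)
  have e3 : ("preconditions" == lv) = false := beq_eq_false_iff_ne.mpr (Ne.symm h3)
  have e4 : ("resolution" == lv) = false := beq_eq_false_iff_ne.mpr (Ne.symm h4)
  have e5 : ("verification" == lv) = false := beq_eq_false_iff_ne.mpr (Ne.symm h5)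
  simp [PySem.Dict.get?, hit, List.find?, e1, e2, e3, e4, e5, h1, h2, h3, h4, h5]

theorem pv_events_map_snd (ss : List String) :
    (pvEvents ss).map (·.2) = ss.filterMap (fun x => pvHEADERS.get? (PySem.Str.lower x)) := by
  unfold pvEvents
  rw [List.map_filterMap]
  have hfun : ∀ p : Int × String,
      ((pvHEADERS.get? (PySem.Str.lower p.2)).map (fun lab => (p.1, lab))).map (·.2)
        = pvHEADERS.get? (PySem.Str.lower p.2) := by
    intro p; cases pvHEADERS.get? (PySem.Str.lower p.2) <;> rfl
  simp only [hfun]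
  rw [show (fun p : Int × String => pvHEADERS.get? (PySem.Str.lower p.2))
      = (fun x => pvHEADERS.get? (PySem.Str.lower x)) ∘ (fun p : Int × String => p.2) from rfl,
    ← List.filterMap_map, pv_enum_map_snd]

theorem pv_events_pairwise (ss : List String) :
    (pvEvents ss).Pairwise (fun a b => a.1 < b.1) := by
  unfold pvEvents
  rw [List.pairwise_filterMap]
  have hp : (PySem.List.enumerate ss 0).Pairwise (fun a b => a.1 < b.1) := by
    rw [List.pairwise_iff_getElem]
    intro i j hi hj hij
    rw [pv_length_enumerate] at hi hj
    rw [pv_getElem_enumerate ss 0 i hi, pv_getElem_enumerate ss 0 j hj]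
    simpa using hij
  refine hp.imp fun {a b} hab => ?_
  intro e he e' he'
  obtain ⟨la, _, hE⟩ := Option.map_eq_some_iff.mp he
  obtain ⟨lb, _, hE'⟩ := Option.map_eq_some_iff.mp he'
  rw [← hE, ← hE']
  exact hab

theorem pv_events_shape (ss : List String) :
    ∀ e ∈ pvEvents ss, ∃ n : Nat, e.1 = (n : Int) ∧ n < ss.length := by
  intro e he
  unfold pvEvents at he
  obtain ⟨p, hp, hfp⟩ := List.mem_filterMap.mp he
  obtain ⟨j, hj, hpe⟩ := List.mem_iff_getElem.mp hp
  rw [pv_length_enumerate] at hj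
  rw [pv_getElem_enumerate ss 0 j hj] at hpe
  obtain ⟨la, _, hE⟩ := Option.map_eq_some_iff.mp hfp
  refine ⟨j, ?_, hj⟩
  rw [← hE]
  simp [← hpe]

theorem pv_events_label_mem (ss : List String) :
    ∀ e ∈ pvEvents ss, e.2 ∈ pvHK := by
  intro e he
  unfold pvEvents at he
  obtain ⟨p, hp, hfp⟩ := List.mem_filterMap.mp he
  obtain ⟨la, hla, hE⟩ := Option.map_eq_some_iff.mp hfp
  rw [pv_get?_HEADERS] at hla
  have h2 : e.2 = la := by rw [← hE]
  rw [h2]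
  split_ifs at hla <;> simp_all [pvHK]

theorem pv_labels_nodup (ss : List String)
    (hcnt : ∀ w ∈ ["module", "overview", "preconditions", "resolution", "verification"],
      (ss.map PySem.Str.lower).count w ≤ 1) :
    ((pvEvents ss).map (·.2)).Nodup := by
  rw [pv_events_map_snd, List.nodup_iff_count_le_one]
  intro a
  rw [pv_count_filterMap]
  have key : ∀ w : String,
      w ∈ (["module", "overview", "preconditions", "resolution", "verification"] : List String) →
      (∀ x : String, pvHEADERS.get? (PySem.Str.lower x) = some a ↔ PySem.Str.lower x = w) →
      ss.countP (fun x => pvHEADERS.get? (PySem.Str.lower x) == some a) ≤ 1 := by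
    intro w hw hiff
    have hc : ss.countP (fun x => pvHEADERS.get? (PySem.Str.lower x) == some a)
        = ss.countP (fun x => PySem.Str.lower x == w) := by
      apply List.countP_congr
      intro x _
      simp only [beq_iff_eq]
      exact hiff x
    rw [hc]
    have h2 := hcnt w hw
    rwa [List.count_eq_countP, List.countP_map] at h2
  by_cases h1 : a = "Module"
  · subst h1
    refine key "module" (by simp) (fun x => ?_)
    rw [pv_get?_HEADERS]
    split_ifs with g1 g2 g3 g4 g5 <;> simp_all
  by_cases h2 : a = "Overview"
  · subst h2
    refine key "overview" (by simp) (fun x => ?_)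
    rw [pv_get?_HEADERS]
    split_ifs with g1 g2 g3 g4 g5 <;> simp_all
  by_cases h3 : a = "Preconditions"
  · subst h3
    refine key "preconditions" (by simp) (fun x => ?_)
    rw [pv_get?_HEADERS]
    split_ifs with g1 g2 g3 g4 g5 <;> simp_all
  by_cases h4 : a = "Resolution"
  · subst h4
    refine key "resolution" (by simp) (fun x => ?_)
    rw [pv_get?_HEADERS]
    split_ifs with g1 g2 g3 g4 g5 <;> simp_all
  by_cases h5 : a = "Verification"
  · subst h5
    refine key "verification" (by simp) (fun x => ?_)
    rw [pv_get?_HEADERS]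
    split_ifs with g1 g2 g3 g4 g5 <;> simp_all
  · have hz : ss.countP (fun x => pvHEADERS.get? (PySem.Str.lower x) == some a) = 0 := by
      rw [List.countP_eq_zero]
      intro x _
      rw [pv_get?_HEADERS]
      split_ifs <;>
        simp [Ne.symm h1, Ne.symm h2, Ne.symm h3, Ne.symm h4, Ne.symm h5]
    simp [hz]

theorem pv_labels_pairwise_ne (ss : List String)
    (hnd : ((pvEvents ss).map (·.2)).Nodup) :
    (pvEvents ss).Pairwise (fun a b => a.2 ≠ b.2) := by
  have := List.pairwise_map.mp hnd
  exact this

-- ---- the two dictionaries ----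

theorem pv_dict_fold_get {κ ν β : Type} [BEq κ] [LawfulBEq κ] (l : List β) (k : β → κ)
    (v : β → ν) (key : κ) (h : (l.map k).Nodup) :
    (l.foldl (fun d a => d.insert (k a) (v a)) PySem.Dict.empty).get? key
      = (l.find? (fun a => k a == key)).map v := by
  have hitems := PySem.Dict.items_foldl_insert_fresh l k v PySem.Dict.empty (fun _ _ => rfl) h
  simp only [PySem.Dict.get?]
  rw [hitems]
  simp only [show (PySem.Dict.empty : PySem.Dict κ ν).items = [] from rfl, List.nil_append,
    List.find?_map, Option.map_map, Function.comp]
  try rfl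

theorem pv_positions_eq_fold (ss : List String) :
    pvPositions ss = (pvEvents ss).foldl (fun d e => d.insert e.2 e.1) PySem.Dict.empty := by
  unfold pvPositions pvEvents
  rw [← pv_foldl_filterMap
    (f := fun p : Int × String => (pvHEADERS.get? (PySem.Str.lower p.2)).map (fun lab => (p.1, lab)))
    (g := fun (d : PySem.Dict String Int) (e : Int × String) => d.insert e.2 e.1)]
  congr 1
  funext d p
  rw [pv_get?_HEADERS]
  by_cases g1 : PySem.Str.lower p.2 = "module"
  · simp [g1]
  by_cases g2 : PySem.Str.lower p.2 = "overview"
  · simp [g1, g2]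
  by_cases g3 : PySem.Str.lower p.2 = "preconditions"
  · simp [g1, g2, g3]
  by_cases g4 : PySem.Str.lower p.2 = "resolution"
  · simp [g1, g2, g3, g4]
  by_cases g5 : PySem.Str.lower p.2 = "verification"
  · simp [g1, g2, g3, g4, g5]
  simp [g1, g2, g3, g4, g5]

theorem pv_positions_get? (ss : List String) (hnd : ((pvEvents ss).map (·.2)).Nodup)
    (L : String) :
    (pvPositions ss).get? L = ((pvEvents ss).find? (fun e => e.2 == L)).map (fun e => e.1) := by
  rw [pv_positions_eq_fold]
  exact pv_dict_fold_get (pvEvents ss) (fun e => e.2) (fun e => e.1) L hnd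

theorem pv_ends_length (ss : List String) : (pvEvents ss).length ≤ (pvEnds ss).length := by
  unfold pvEnds
  simp only [List.length_append, List.length_map, List.length_drop, List.length_cons,
    List.length_nil]
  omega

theorem pv_zip_length (ss : List String) :
    ((pvEvents ss).zip (pvEnds ss)).length = (pvEvents ss).length := by
  rw [List.length_zip]
  exact Nat.min_eq_left (pv_ends_length ss)

theorem pv_ends_getElem (ss : List String) (j : Nat) (hj : j < (pvEvents ss).length) :
    (pvEnds ss)[j]'(lt_of_lt_of_le hj (pv_ends_length ss)) =
      if h : j + 1 < (pvEvents ss).length then (pvEvents ss)[j+1].1 else (ss.length : Int) := by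
  unfold pvEnds
  by_cases h : j + 1 < (pvEvents ss).length
  · rw [dif_pos h]
    have hlt : j < (((pvEvents ss).drop 1).map (fun e : Int × String => e.1)).length := by
      simp only [List.length_map, List.length_drop]
      omega
    rw [List.getElem_append_left hlt, List.getElem_map, List.getElem_drop]
    simp only [Nat.add_comm 1 j]
  · rw [dif_neg h]
    have hge : (((pvEvents ss).drop 1).map (fun e : Int × String => e.1)).length ≤ j := by
      simp only [List.length_map, List.length_drop]
      omega
    rw [List.getElem_append_right hge]
    simp

theorem pv_sections_get? (ss : List String) (hnd : ((pvEvents ss).map (·.2)).Nodup)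
    (L : String) :
    (pvSections ss).get? L =
      (((pvEvents ss).zip (pvEnds ss)).find? (fun pe => pe.1.2 == L)).map (pvVal ss) := by
  have hfst : List.map Prod.fst ((pvEvents ss).zip (pvEnds ss)) = pvEvents ss :=
    List.map_fst_zip (pv_ends_length ss)
  have hkeys : (List.map (fun pe : (Int × String) × Int => pe.1.2)
      ((pvEvents ss).zip (pvEnds ss))).Nodup := by
    have h2 : List.map (fun pe : (Int × String) × Int => pe.1.2) ((pvEvents ss).zip (pvEnds ss))
        = (List.map Prod.fst ((pvEvents ss).zip (pvEnds ss))).map (·.2) := by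
      rw [List.map_map]
      rfl
    rw [h2, hfst]
    exact hnd
  exact pv_dict_fold_get ((pvEvents ss).zip (pvEnds ss))
    (fun pe => pe.1.2) (fun pe => pvVal ss pe) L hkeys

-- ---- content slices ----

theorem pv_range_filter (ss : List String) :
    ∀ (n a : Nat), a + n ≤ ss.length →
      (PySem.List.pyRange (a : Int) ((a + n : Nat) : Int)).filterMap
        (fun i =>
          if PySem.List.pyGetD ss i "" = "" then none
          else some (PySem.List.pyGetD ss i ""))
      = ((ss.drop a).take n).filter (fun s => !(s == "")) := by
  intro n
  induction n with
  | zero =>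
    intro a _
    have h0 : PySem.List.pyRange (a : Int) ((a + 0 : Nat) : Int) = [] := by
      rw [List.eq_nil_iff_forall_not_mem]
      intro x hx
      have h1 := PySem.List.mem_pyRange_one.mp hx
      have : ((a + 0 : Nat) : Int) = (a : Int) := by push_cast; ring
      omega
    simp [h0]
  | succ k ih =>
    intro a ha
    have hlt : (a : Int) < ((a + (k + 1) : Nat) : Int) := by push_cast; omega
    rw [PySem.List.pyRange_one_cons hlt, List.filterMap_cons]
    have hal : a < ss.length := by omega
    have hgd : PySem.List.pyGetD ss (a : Int) "" = ss[a] := by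
      rw [PySem.List.pyGetD_natCast, List.getD_eq_getElem ss "" hal]
    have harr : ((a : Int) + 1) = ((a + 1 : Nat) : Int) := by push_cast; ring
    have hb : ((a + (k + 1) : Nat) : Int) = (((a + 1) + k : Nat) : Int) := by push_cast; ring
    rw [harr, hb, ih (a + 1) (by omega)]
    rw [List.drop_eq_getElem_cons hal, List.take_succ_cons, List.filter_cons]
    by_cases he : ss[a] = ""
    · simp [hgd, he]
    · simp [hgd, he]

theorem pv_content_eq (lines ss : List String) (hmap : lines.map PySem.Str.strip = ss)
    (n m : Nat) (hm : m ≤ ss.length) :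
    (PySem.List.pyRange ((n : Int) + 1) (m : Int)).filterMap
      (fun i =>
        if PySem.Str.strip (PySem.List.pyGetD lines i "") = "" then none
        else some (PySem.Str.strip (PySem.List.pyGetD lines i "")))
    = (PySem.List.slice ss (some ((n : Int) + 1)) (some (m : Int))).filter
        (fun s => !(s == "")) := by
  have hlen : lines.length = ss.length := by
    have := congrArg List.length hmap
    simpa using this
  have hcg : (PySem.List.pyRange ((n : Int) + 1) (m : Int)).filterMap
      (fun i =>
        if PySem.Str.strip (PySem.List.pyGetD lines i "") = "" then none
        else some (PySem.Str.strip (PySem.List.pyGetD lines i "")))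
      = (PySem.List.pyRange ((n : Int) + 1) (m : Int)).filterMap
      (fun i =>
        if PySem.List.pyGetD ss i "" = "" then none
        else some (PySem.List.pyGetD ss i "")) := by
    apply List.filterMap_congr
    intro x hx
    have hx' := PySem.List.mem_pyRange_one.mp hx
    obtain ⟨k, rfl⟩ : ∃ k : Nat, x = (k : Int) :=
      ⟨x.toNat, (Int.toNat_of_nonneg (by omega)).symm⟩
    have hkm : k < m := by omega
    have hks : k < ss.length := by omega
    have hkl : k < lines.length := by omega
    rw [PySem.List.pyGetD_natCast, PySem.List.pyGetD_natCast,
      List.getD_eq_getElem lines "" hkl, List.getD_eq_getElem ss "" hks]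
    have hst : PySem.Str.strip lines[k] = ss[k] := by
      simp only [← hmap, List.getElem_map]
    rw [hst]
  rw [hcg]
  have h1 : ((n : Int) + 1) = ((n + 1 : Nat) : Int) := by push_cast; ring
  rw [h1, PySem.List.slice_natCast]
  by_cases hnm : n + 1 ≤ m
  · have h2 := pv_range_filter ss (m - (n + 1)) (n + 1) (by omega)
    rw [show (n + 1) + (m - (n + 1)) = m from by omega] at h2
    exact h2
  · have hr : PySem.List.pyRange ((n + 1 : Nat) : Int) (m : Int) = [] := by
      rw [List.eq_nil_iff_forall_not_mem]
      intro x hx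
      have := PySem.List.mem_pyRange_one.mp hx
      omega
    rw [hr, show m - (n + 1) = 0 from by omega]
    simp

-- ---- per-label equality (port A vs the events view) ----

theorem pv_subsequent_mem (ss : List String) (hnd : ((pvEvents ss).map (·.2)).Nodup)
    (start x : Int) :
    x ∈ pvHK.filterMap (fun key =>
        match (pvPositions ss).get? key with
        | some p => if start < p then some p else none
        | none => none)
      ↔ ∃ e ∈ pvEvents ss, e.1 = x ∧ start < x := by
  constructor
  · intro hx
    obtain ⟨k, _, hfk⟩ := List.mem_filterMap.mp hx
    rw [pv_positions_get? ss hnd k] at hfk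
    cases hfind : (pvEvents ss).find? (fun e => e.2 == k) with
    | none => rw [hfind] at hfk; simp at hfk
    | some e =>
      rw [hfind] at hfk
      simp only [Option.map_some] at hfk
      by_cases hc : start < e.1
      · rw [if_pos hc] at hfk
        have hex : e.1 = x := by simpa using hfk
        exact ⟨e, List.mem_of_find?_eq_some hfind, hex, by omega⟩
      · rw [if_neg hc] at hfk; cases hfk
  · rintro ⟨e, he, rfl, hlt⟩
    apply List.mem_filterMap.mpr
    refine ⟨e.2, pv_events_label_mem ss e he, ?_⟩
    have hfind : (pvEvents ss).find? (fun e' => e'.2 == e.2) = some e := by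
      obtain ⟨j, hj, hje⟩ := List.mem_iff_getElem.mp he
      apply List.find?_eq_some_iff_getElem.mpr
      refine ⟨by simp, j, hj, hje, ?_⟩
      intro i hi
      have hpw := List.pairwise_iff_getElem.mp (pv_labels_pairwise_ne ss hnd) i j
        (lt_trans hi hj) hj hi
      rw [hje] at hpw
      simpa using hpw
    rw [pv_positions_get? ss hnd e.2, hfind]
    simp [hlt]

theorem pv_val_spec (ss : List String) (hfix : ∀ x ∈ ss, PySem.Str.strip x = x)
    (n m : Nat) :
    ∀ x ∈ (PySem.List.slice ss (some ((n : Int) + 1)) (some (m : Int))).filter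
        (fun s => !(s == "")), x ≠ "" ∧ PySem.Str.strip x = x := by
  intro x hx
  have h1 := List.mem_filter.mp hx
  have hxs : x ∈ ss := by
    have h2 := h1.1
    rw [show ((n : Int) + 1) = ((n + 1 : Nat) : Int) from by push_cast; ring,
      PySem.List.slice_natCast] at h2
    exact (List.drop_sublist _ _).subset ((List.take_sublist _ _).subset h2)
  exact ⟨by simpa using h1.2, hfix x hxs⟩

theorem pv_label_eq (lines ss : List String) (hmap : lines.map PySem.Str.strip = ss)
    (hnd : ((pvEvents ss).map (·.2)).Nodup)
    (hfix : ∀ x ∈ ss, PySem.Str.strip x = x) (L : String) :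
    pvExtractSection lines (pvPositions ss) L = ((pvSections ss).get? L).getD none := by
  have hlen : lines.length = ss.length := by
    have := congrArg List.length hmap
    simpa using this
  rw [pv_sections_get? ss hnd L]
  cases hfind : (pvEvents ss).find? (fun e => e.2 == L) with
  | none =>
    have hB : (((pvEvents ss).zip (pvEnds ss)).find? (fun pe => pe.1.2 == L)) = none := by
      rw [List.find?_eq_none]
      rintro ⟨e, b⟩ hpe
      have h1 : e ∈ pvEvents ss := (List.of_mem_zip hpe).1
      have := List.find?_eq_none.mp hfind e h1
      simpa using this
    unfold pvExtractSection
    rw [pv_positions_get? ss hnd L, hfind, hB]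
    rfl
  | some e =>
    obtain ⟨hqe, j, hj, hje, hfirst⟩ := List.find?_eq_some_iff_getElem.mp hfind
    have hmem : e ∈ pvEvents ss := List.mem_of_find?_eq_some hfind
    obtain ⟨n, hn1, hn2⟩ := pv_events_shape ss e hmem
    have hje1 : (pvEvents ss)[j].1 = e.1 := congrArg Prod.fst hje
    have hzip : ((pvEvents ss).zip (pvEnds ss)).find? (fun pe => pe.1.2 == L)
        = some ((pvEvents ss)[j],
            (pvEnds ss)[j]'(lt_of_lt_of_le hj (pv_ends_length ss))) := by
      apply List.find?_eq_some_iff_getElem.mpr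
      refine ⟨by rw [hje]; exact hqe, j, by rw [pv_zip_length]; exact hj, ?_, ?_⟩
      · rw [List.getElem_zip]
      · intro i hi
        have hi' : i < (pvEvents ss).length := lt_trans hi hj
        have := hfirst i hi
        simp only [List.getElem_zip]
        exact this
    rw [pv_ends_getElem ss j hj] at hzip
    rw [hje] at hzip
    unfold pvExtractSection
    rw [pv_positions_get? ss hnd L, hfind]
    simp only [Option.map_some, Option.getD_some]
    have hpw := List.pairwise_iff_getElem.mp (pv_events_pairwise ss)
    have hsubs : ∀ x : Int,
        x ∈ pvHK.filterMap (fun key =>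
          match (pvPositions ss).get? key with
          | some p => if e.1 < p then some p else none
          | none => none)
        ↔ ∃ e' ∈ pvEvents ss, e'.1 = x ∧ e.1 < x := pv_subsequent_mem ss hnd e.1
    by_cases hj1 : j + 1 < (pvEvents ss).length
    · -- a next header event exists
      rw [dif_pos hj1] at hzip
      obtain ⟨m, hm1, hm2⟩ := pv_events_shape ss ((pvEvents ss)[j+1])
        (List.getElem_mem hj1)
      have hlt_next : e.1 < (pvEvents ss)[j+1].1 := by
        have h1 := hpw j (j+1) hj hj1 (by omega)
        omega
      have hminP : PySem.List.min? (pvHK.filterMap (fun key =>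
          match (pvPositions ss).get? key with
          | some p => if e.1 < p then some p else none
          | none => none)) (fun x => x) = some ((pvEvents ss)[j+1].1) := by
        rw [pv_min?_int, List.min?_eq_some_iff]
        constructor
        · exact (hsubs _).mpr ⟨(pvEvents ss)[j+1], List.getElem_mem hj1, rfl, hlt_next⟩
        · intro b hb
          obtain ⟨e', he', rfl, hlt⟩ := (hsubs b).mp hb
          obtain ⟨i, hil, hie⟩ := List.mem_iff_getElem.mp he'
          have hie1 : (pvEvents ss)[i].1 = e'.1 := congrArg Prod.fst hie
          have hji : j < i := by
            rcases Nat.lt_trichotomy i j with hij | hij | hij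
            · have := hpw i j hil hj hij
              omega
            · subst hij
              omega
            · exact hij
          rcases Nat.eq_or_lt_of_le (by omega : j + 1 ≤ i) with hii | hii
          · subst hii
            omega
          · have := hpw (j+1) i hj1 hil hii
            omega
      rw [hm1] at hminP hzip
      rw [hminP, Option.getD_some]
      rw [hzip]
      simp only [Option.map_some, Option.getD_some]
      unfold pvVal pvContent
      simp only []
      rw [hn1]
      rw [pv_content_eq lines ss hmap n m (by omega)]
      have hjoin := pvStr_strip_join "\n"
        ((PySem.List.slice ss (some ((n : Int) + 1)) (some (m : Int))).filter
          (fun s => !(s == ""))) (pv_val_spec ss hfix n m)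
      by_cases hce : ((PySem.List.slice ss (some ((n : Int) + 1)) (some (m : Int))).filter
          (fun s => !(s == ""))).isEmpty
      · rw [if_pos hce, if_pos hce]
      · rw [if_neg (by simpa using hce), if_neg (by simpa using hce), hjoin]
    · -- e is the last header event
      rw [dif_neg hj1] at hzip
      have hempty : pvHK.filterMap (fun key =>
          match (pvPositions ss).get? key with
          | some p => if e.1 < p then some p else none
          | none => none) = [] := by
        rw [List.eq_nil_iff_forall_not_mem]
        intro x hx
        obtain ⟨e', he', rfl, hlt⟩ := (hsubs x).mp hx
        obtain ⟨i, hil, hie⟩ := List.mem_iff_getElem.mp he'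
        have hie1 : (pvEvents ss)[i].1 = e'.1 := congrArg Prod.fst hie
        have hji : j < i := by
          rcases Nat.lt_trichotomy i j with hij | hij | hij
          · have := hpw i j hil hj hij
            omega
          · subst hij
            omega
          · exact hij
        omega
      rw [hempty]
      rw [show PySem.List.min? ([] : List Int) (fun x => x) = none from rfl, Option.getD_none]
      rw [hzip]
      simp only [Option.map_some, Option.getD_some]
      unfold pvVal pvContent
      simp only []
      rw [hn1, hlen]
      rw [pv_content_eq lines ss hmap n ss.length (by omega)]
      have hjoin := pvStr_strip_join "\n"
        ((PySem.List.slice ss (some ((n : Int) + 1)) (some ((ss.length : Nat) : Int))).filter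
          (fun s => !(s == ""))) (pv_val_spec ss hfix n ss.length)
      by_cases hce : ((PySem.List.slice ss (some ((n : Int) + 1))
          (some ((ss.length : Nat) : Int))).filter (fun s => !(s == ""))).isEmpty
      · rw [if_pos hce, if_pos hce]
      · rw [if_neg (by simpa using hce), if_neg (by simpa using hce), hjoin]

theorem pv_label_val (ss : List String) (hnd : ((pvEvents ss).map (·.2)).Nodup)
    (hfix : ∀ x ∈ ss, PySem.Str.strip x = x) (L : String) :
    ∀ t, ((pvSections ss).get? L).getD none = some t →
      t ≠ "" ∧ PySem.Str.strip t = t := by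
  intro t ht
  rw [pv_sections_get? ss hnd L] at ht
  cases hf : ((pvEvents ss).zip (pvEnds ss)).find? (fun pe => pe.1.2 == L) with
  | none => rw [hf] at ht; cases ht
  | some pe =>
    rw [hf] at ht
    simp only [Option.map_some, Option.getD_some] at ht
    obtain ⟨e, b⟩ := pe
    have hmem := List.mem_of_find?_eq_some hf
    have he : e ∈ pvEvents ss := (List.of_mem_zip hmem).1
    have hb : b ∈ pvEnds ss := (List.of_mem_zip hmem).2
    obtain ⟨n, hn1, _⟩ := pv_events_shape ss e he
    have hbnat : ∃ m : Nat, b = (m : Int) := by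
      unfold pvEnds at hb
      rcases List.mem_append.mp hb with h1 | h1
      · obtain ⟨e', he', rfl⟩ := List.mem_map.mp h1
        obtain ⟨m, hm1, _⟩ := pv_events_shape ss e'
          ((List.drop_sublist 1 (pvEvents ss)).subset he')
        exact ⟨m, hm1⟩
      · exact ⟨ss.length, by simpa using h1⟩
    obtain ⟨m, rfl⟩ := hbnat
    unfold pvVal pvContent at ht
    simp only [hn1] at ht
    by_cases hce : ((PySem.List.slice ss (some ((n : Int) + 1)) (some (m : Int))).filter
        (fun s => !(s == ""))).isEmpty
    · rw [if_pos hce] at ht; cases ht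
    · rw [if_neg (by simpa using hce)] at ht
      have ht' : t = PySem.Str.join "\n"
          ((PySem.List.slice ss (some ((n : Int) + 1)) (some (m : Int))).filter
            (fun s => !(s == ""))) := by
        exact (Option.some.injEq _ _ ▸ ht).symm
      cases hcc : (PySem.List.slice ss (some ((n : Int) + 1)) (some (m : Int))).filter
          (fun s => !(s == "")) with
      | nil => rw [hcc] at hce; simp at hce
      | cons c rest =>
        have hcel := pv_val_spec ss hfix n m
        rw [hcc] at hcel ht'
        have hc1 := hcel c (by simp)
        constructor
        · rw [ht']
          exact pvStr_join_ne_empty "\n" c rest hc1.1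
        · rw [ht']
          exact pvStr_strip_join "\n" (c :: rest) hcel

theorem pv_title_eq (ss : List String) (hnd : ((pvEvents ss).map (·.2)).Nodup)
    (hfix : ∀ x ∈ ss, PySem.Str.strip x = x) (hne : ss ≠ []) :
    (match (pvPositions ss).get? "Module" with
      | some module_idx =>
        some (PySem.Str.strip (PySem.Str.join " "
          ((PySem.List.pyRange 0 module_idx).filterMap
            (fun i =>
              if PySem.List.pyGetD ss i "" = "" then none
              else some (PySem.List.pyGetD ss i "")))))
      | none => if ss.isEmpty then none else some (PySem.List.pyGetD ss 0 ""))
    = some (pvTitle ss) := by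
  unfold pvTitle
  rw [pv_positions_get? ss hnd "Module"]
  cases hfind : (pvEvents ss).find? (fun e => e.2 == "Module") with
  | none =>
    simp [List.isEmpty_iff, hne]
  | some e =>
    obtain ⟨n, hn1, hn2⟩ := pv_events_shape ss e (List.mem_of_find?_eq_some hfind)
    simp only [Option.map_some]
    rw [hn1]
    have hr := pv_range_filter ss n 0 (by omega)
    rw [Nat.zero_add] at hr
    rw [show ((0 : Nat) : Int) = (0 : Int) from rfl] at hr
    rw [List.drop_zero] at hr
    rw [hr]
    have hsl : PySem.List.slice ss none (some ((n : Nat) : Int)) = ss.take n := by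
      rw [PySem.List.slice_to ss (by positivity)]
      simp
    rw [hsl]
    have helems : ∀ x ∈ (ss.take n).filter (fun s => !(s == "")),
        x ≠ "" ∧ PySem.Str.strip x = x := by
      intro x hx
      have h1 := List.mem_filter.mp hx
      exact ⟨by simpa using h1.2, hfix x ((List.take_sublist _ _).subset h1.1)⟩
    rw [pvStr_strip_join " " _ helems]

theorem pv_items_six (t m o p r v : Option String) :
    ((PySem.Dict.empty : PySem.Dict String (Option String)).insert "Title" none
      |>.insert "Overview" none |>.insert "Preconditions" none |>.insert "Resolution" none
      |>.insert "Verification" none |>.insert "Module" none |>.insert "Title" t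
      |>.insert "Module" m |>.insert "Overview" o |>.insert "Preconditions" p
      |>.insert "Resolution" r |>.insert "Verification" v).items
      = [("Title", t), ("Overview", o), ("Preconditions", p), ("Resolution", r),
         ("Verification", v), ("Module", m)] := rfl

-- ---- the common events-view value and port A's equality to it ----

def pvAltSpec (sop_text : String) : List (String × Option String) :=
  let stripped := ((PySem.Str.split? sop_text "\n").getD []).map PySem.Str.strip
  if !stripped.any (fun s => !(s == "")) then
    [("Title", none), ("Overview", none), ("Preconditions", none), ("Resolution", none),
     ("Verification", none), ("Module", none)]
  else
    let sections := pvSections stripped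
    let title : String := pvTitle stripped
    [("Title", if title = "" then none else some title),
     ("Overview", (sections.get? "Overview").getD none),
     ("Preconditions", (sections.get? "Preconditions").getD none),
     ("Resolution", (sections.get? "Resolution").getD none),
     ("Verification", (sections.get? "Verification").getD none),
     ("Module", some (match (sections.get? "Module").getD none with
        | some m => if m = "" then "Unknown" else m
        | none => "Unknown"))]

theorem pv_A_eq (s : String) (hpre : Pre_parse_sop_section s) :
    parse_sop_section s = pvAltSpec s := by
  have hss : (((PySem.Str.split? s "\n").getD []).map PySem.Str.rstrip).map PySem.Str.strip
      = ((PySem.Str.split? s "\n").getD []).map PySem.Str.strip := by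
    rw [List.map_map]
    exact List.map_congr_left (fun x _ => pvStr_strip_rstrip x)
  have hfix : ∀ x ∈ ((PySem.Str.split? s "\n").getD []).map PySem.Str.strip,
      PySem.Str.strip x = x := by
    intro x hx
    obtain ⟨y, _, rfl⟩ := List.mem_map.mp hx
    exact pvStr_strip_idem y
  have hcnt : ∀ w ∈ ["module", "overview", "preconditions", "resolution", "verification"],
      ((((PySem.Str.split? s "\n").getD []).map PySem.Str.strip).map PySem.Str.lower).count w ≤ 1 := by
    intro w hw
    have h1 := hpre w hw
    unfold pvStrippedLower at h1
    rw [List.map_map]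
    exact h1
  have hnd := pv_labels_nodup _ hcnt
  unfold parse_sop_section pvAltSpec
  simp only [hss]
  by_cases hany : ((((PySem.Str.split? s "\n").getD []).map PySem.Str.strip).any
      (fun s => !(s == ""))) = true
  · have hc : ¬((!((List.map PySem.Str.strip ((PySem.Str.split? s "\n").getD [])).any
        (fun s => !(s == "")))) = true) := by
      rw [hany]; decide
    rw [if_neg hc, if_neg hc]
    have hnonnil : ((PySem.Str.split? s "\n").getD []).map PySem.Str.strip ≠ [] := by
      intro h0
      rw [h0] at hany
      simp at hany
    rw [pv_items_six]
    have hT := pv_title_eq _ hnd hfix hnonnil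
    rw [hT]
    rw [pv_label_eq _ _ hss hnd hfix "Overview",
      pv_label_eq _ _ hss hnd hfix "Preconditions",
      pv_label_eq _ _ hss hnd hfix "Resolution",
      pv_label_eq _ _ hss hnd hfix "Verification",
      pv_label_eq _ _ hss hnd hfix "Module"]
    cases hMv : ((pvSections (((PySem.Str.split? s "\n").getD []).map PySem.Str.strip)).get?
        "Module").getD none with
    | none => rfl
    | some t =>
      obtain ⟨ht1, ht2⟩ := pv_label_val _ hnd hfix "Module" t hMv
      simp [normalize_module, ht1, ht2]
  · have hf : ((((PySem.Str.split? s "\n").getD []).map PySem.Str.strip).any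
        (fun s => !(s == ""))) = false := by
      simpa using hany
    have hc : ((!((List.map PySem.Str.strip ((PySem.Str.split? s "\n").getD [])).any
        (fun s => !(s == "")))) = true) := by
      rw [hf]; rfl
    rw [if_pos hc, if_pos hc]
    rfl

-- ---- port B: the state-machine invariant ----

theorem pv_isEmpty_filter {α : Type} (l : List α) (p : α → Bool) :
    (l.filter p).isEmpty = !(l.any p) := by
  induction l with
  | nil => rfl
  | cons a t ih => cases ha : p a <;> simp [List.filter_cons, ha, ih]

theorem pv_zip_take {α β : Type} : ∀ (l : List α) (m : List β),
    l.zip m = (l.take m.length).zip m := by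
  intro l
  induction l with
  | nil => intro m; simp
  | cons a t ih =>
    intro m
    cases m with
    | nil => simp
    | cons b u => simp [List.take_succ_cons, ih u]

theorem pv_zip_adj_fst {α : Type} (E' : List α) (e : α) :
    (E' ++ [e]).zip ((E' ++ [e]).drop 1) = E'.zip ((E' ++ [e]).drop 1) := by
  rw [pv_zip_take]
  have hl : ((E' ++ [e]).drop 1).length = E'.length := by simp
  rw [hl, List.take_left]

theorem pv_mem_zip_adj_fst {α : Type} (E : List α) (q : α × α)
    (hq : q ∈ E.zip (E.drop 1)) : q.1 ∈ E.dropLast := by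
  rw [pv_zip_take] at hq
  have h1 := (List.of_mem_zip hq).1
  have h2 : E.take (E.drop 1).length = E.dropLast := by
    rw [List.dropLast_eq_take]
    congr 1
    simp
  rwa [h2] at h1

theorem pv_zip_tail_snoc {α : Type} : ∀ (l : List α) (e ev : α), l.getLast? = some e →
    (l ++ [ev]).zip ((l ++ [ev]).drop 1) = l.zip (l.drop 1) ++ [(e, ev)] := by
  intro l
  induction l with
  | nil => intro e ev h; cases h
  | cons y t ih =>
    intro e ev h
    cases t with
    | nil =>
      have he : y = e := by simpa using h
      subst he
      simp
    | cons z u =>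
      have h' : (z :: u).getLast? = some e := by
        rwa [List.getLast?_cons_cons] at h
      have hrec := ih e ev h'
      simp only [List.cons_append, List.drop_succ_cons, List.drop_zero,
        List.zip_cons_cons] at hrec ⊢
      rw [hrec]

theorem pv_header_ne_empty (x lab : String)
    (h : pvHEADERS.get? (PySem.Str.lower x) = some lab) : (x == "") = false := by
  by_cases hx : x = ""
  · subst hx
    have hnone : pvHEADERS.get? (PySem.Str.lower "") = none := by decide
    rw [hnone] at h
    cases h
  · exact beq_eq_false_iff_ne.mpr hx

theorem pv_events_append_none (p : List String) (x : String)
    (h : pvHEADERS.get? (PySem.Str.lower x) = none) :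
    pvEvents (p ++ [x]) = pvEvents p := by
  unfold pvEvents
  rw [pv_enumerate_append p x 0, List.filterMap_append]
  simp [h]

theorem pv_events_append_some (p : List String) (x lab : String)
    (h : pvHEADERS.get? (PySem.Str.lower x) = some lab) :
    pvEvents (p ++ [x]) = pvEvents p ++ [((p.length : Int), lab)] := by
  unfold pvEvents
  rw [pv_enumerate_append p x 0, List.filterMap_append]
  simp [h]

theorem pv_content_stable (p : List String) (x : String) (n m : Nat) (hm : m ≤ p.length) :
    pvContent (p ++ [x]) ((n : Int)) ((m : Int)) = pvContent p ((n : Int)) ((m : Int)) := by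
  unfold pvContent
  have h1 : ((n : Int) + 1) = ((n + 1 : Nat) : Int) := by push_cast; ring
  rw [h1, PySem.List.slice_natCast, PySem.List.slice_natCast]
  by_cases hc : n + 1 ≤ p.length
  · rw [List.drop_append_of_le_length hc]
    rw [List.take_append_of_le_length (by simp; omega)]
  · rw [show m - (n + 1) = 0 from by omega]
    simp

theorem pv_content_snoc (p : List String) (x : String) (n : Nat) (hn : n < p.length) :
    pvContent (p ++ [x]) ((n : Int)) (((p ++ [x]).length : Int))
      = pvContent p ((n : Int)) ((p.length : Int)) ++ (if x == "" then [] else [x]) := by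
  unfold pvContent
  have h1 : ((n : Int) + 1) = ((n + 1 : Nat) : Int) := by push_cast; ring
  have h2 : (((p ++ [x]).length : Int)) = ((p.length + 1 : Nat) : Int) := by simp
  rw [h1, h2, PySem.List.slice_natCast, PySem.List.slice_natCast]
  rw [List.drop_append_of_le_length (by omega)]
  have htk1 : ((p.drop (n + 1) ++ [x]).take (p.length + 1 - (n + 1))) = p.drop (n + 1) ++ [x] := by
    apply List.take_of_length_le
    simp
    omega
  have htk2 : (p.drop (n + 1)).take (p.length - (n + 1)) = p.drop (n + 1) := by
    apply List.take_of_length_le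
    simp
  rw [htk1, htk2, List.filter_append]
  cases hxe : (x == "") <;> simp [List.filter, hxe]

theorem pv_content_last_nil (p : List String) (x : String) :
    pvContent (p ++ [x]) ((p.length : Int)) (((p ++ [x]).length : Int)) = [] := by
  unfold pvContent
  have h1 : ((p.length : Int) + 1) = ((p.length + 1 : Nat) : Int) := by push_cast; ring
  have h2 : (((p ++ [x]).length : Int)) = ((p.length + 1 : Nat) : Int) := by simp
  rw [h1, h2, PySem.List.slice_natCast]
  simp

theorem pv_take_filter_stable (p : List String) (x : String) (n : Nat) (hn : n ≤ p.length) :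
    (PySem.List.slice (p ++ [x]) none (some ((n : Int)))).filter (fun s => !(s == ""))
      = (PySem.List.slice p none (some ((n : Int)))).filter (fun s => !(s == "")) := by
  rw [PySem.List.slice_to_natCast, PySem.List.slice_to_natCast,
    List.take_append_of_le_length hn]

-- the loop invariant: after processing the stripped lines p, the state is determined by the
-- header events of p
def pvInv (p : List String) (st : PvState) : Prop :=
  st.seen = p.filter (fun s => !(s == "")) ∧
  st.current = ((pvEvents p).getLast?).map (·.2) ∧
  st.buf = (match (pvEvents p).getLast? with
    | none => []
    | some e => pvContent p e.1 ((p.length : Int))) ∧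
  st.title = ((pvEvents p).find? (fun e => e.2 == "Module")).map
      (fun e => PySem.Str.join " " ((PySem.List.slice p none (some e.1)).filter
        (fun s => !(s == "")))) ∧
  ∀ L : String, st.sections.get? L =
    (((pvEvents p).zip ((pvEvents p).drop 1)).find? (fun q => q.1.2 == L)).map
      (fun q => pvContent p q.1.1 q.2.1)

theorem pv_inv : ∀ (p : List String), ((pvEvents p).map (·.2)).Nodup →
    pvInv p (p.foldl pvStepLine pvInit) := by
  intro p
  induction p using List.reverseRecOn with
  | nil =>
    intro _
    exact ⟨rfl, rfl, rfl, rfl, fun L => rfl⟩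
  | append_singleton p x ih =>
    intro hnd
    rw [List.foldl_append, List.foldl_cons, List.foldl_nil]
    cases hx : pvHEADERS.get? (PySem.Str.lower x) with
    | none =>
      have hE := pv_events_append_none p x hx
      have hndp : ((pvEvents p).map (·.2)).Nodup := by rwa [hE] at hnd
      obtain ⟨h1, h2, h3, h4, h5⟩ := ih hndp
      refine ⟨?_, ?_, ?_, ?_, ?_⟩
      · simp only [pvStepLine, hx, Option.elim_none, Option.elim_some]
        rw [h1, List.filter_append]
        cases hxe : (x == "") <;> simp [List.filter, hxe]
      · simp only [pvStepLine, hx, Option.elim_none, Option.elim_some]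
        rw [h2, hE]
      · simp only [pvStepLine, hx, Option.elim_none, Option.elim_some]
        rw [hE]
        cases hlast : (pvEvents p).getLast? with
        | none =>
          have hcur : (p.foldl pvStepLine pvInit).current = none := by
            rw [h2, hlast]; rfl
          rw [h3, hlast]
          simp [hcur]
        | some e =>
          have hcur : (p.foldl pvStepLine pvInit).current = some e.2 := by
            rw [h2, hlast]; rfl
          obtain ⟨n, hn1, hn2⟩ := pv_events_shape p e (List.mem_of_getLast? hlast)
          rw [h3, hlast]
          simp only [hcur, Option.isSome_some, Bool.and_true]
          simp only [hn1]
          rw [pv_content_snoc p x n hn2]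
          cases hxe : (x == "") <;> simp [hxe]
      · simp only [pvStepLine, hx, Option.elim_none, Option.elim_some]
        rw [h4, hE]
        cases hfind : (pvEvents p).find? (fun e => e.2 == "Module") with
        | none => rfl
        | some e =>
          obtain ⟨n, hn1, hn2⟩ := pv_events_shape p e (List.mem_of_find?_eq_some hfind)
          simp only [Option.map_some, hn1]
          rw [pv_take_filter_stable p x n (by omega)]
      · intro L
        simp only [pvStepLine, hx, Option.elim_none, Option.elim_some]
        rw [h5 L, hE]
        cases hfind : ((pvEvents p).zip ((pvEvents p).drop 1)).find?
            (fun q => q.1.2 == L) with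
        | none => rfl
        | some q =>
          have hq := List.mem_of_find?_eq_some hfind
          have hq1 : q.1 ∈ pvEvents p := (List.of_mem_zip hq).1
          have hq2 : q.2 ∈ (pvEvents p).drop 1 := (List.of_mem_zip hq).2
          obtain ⟨n, hn1, _⟩ := pv_events_shape p q.1 hq1
          obtain ⟨m, hm1, hm2⟩ := pv_events_shape p q.2 ((List.drop_sublist 1 _).subset hq2)
          simp only [Option.map_some, hn1, hm1]
          rw [pv_content_stable p x n m (by omega)]
    | some lab =>
      have hE := pv_events_append_some p x lab hx
      have hxe : (x == "") = false := pv_header_ne_empty x lab hx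
      have hndp : ((pvEvents p).map (·.2)).Nodup := by
        rw [hE, List.map_append] at hnd
        exact hnd.of_append_left
      have hfresh : lab ∉ (pvEvents p).map (·.2) := by
        rw [hE, List.map_append] at hnd
        have hdisj := (List.nodup_append.mp hnd).2.2
        intro hmem
        exact (hdisj _ hmem lab (by simp)) rfl
      obtain ⟨h1, h2, h3, h4, h5⟩ := ih hndp
      refine ⟨?_, ?_, ?_, ?_, ?_⟩
      · simp only [pvStepLine, hx, hxe, Option.elim_none, Option.elim_some]
        rw [h1, List.filter_append]
        simp [List.filter, hxe]
      · simp only [pvStepLine, hx, Option.elim_none, Option.elim_some]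
        rw [hE, List.getLast?_concat]
        rfl
      · simp only [pvStepLine, hx, Option.elim_none, Option.elim_some]
        rw [hE, List.getLast?_concat]
        simp only []
        rw [pv_content_last_nil]
      · simp only [pvStepLine, hx, Option.elim_none, Option.elim_some]
        rw [hE, List.find?_append]
        by_cases hlab : lab = "Module"
        · subst hlab
          have hnone : (pvEvents p).find? (fun e => e.2 == "Module") = none := by
            rw [List.find?_eq_none]
            intro e he hbeq
            exact hfresh (List.mem_map.mpr ⟨e, he, (beq_iff_eq.mp hbeq)⟩)
          rw [hnone, h1]
          have hsl : PySem.List.slice (p ++ [x]) none (some ((p.length : Nat) : Int)) = p := by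
            rw [PySem.List.slice_to_natCast, List.take_left]
          simp [hsl]
        · have hif : (lab == "Module") = false := beq_eq_false_iff_ne.mpr hlab
          simp only [hif, Bool.false_eq_true, if_false]
          rw [h4]
          have hsing : (([((p.length : Int), lab)]).find? (fun e => e.2 == "Module")) = none := by
            simp [hif]
          rw [hsing, Option.or_none]
          cases hfind : (pvEvents p).find? (fun e => e.2 == "Module") with
          | none => rfl
          | some e =>
            obtain ⟨n, hn1, hn2⟩ := pv_events_shape p e (List.mem_of_find?_eq_some hfind)
            simp only [Option.map_some, hn1]
            rw [pv_take_filter_stable p x n (by omega)]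
      · intro L
        simp only [pvStepLine, hx, Option.elim_none, Option.elim_some]
        cases hlast : (pvEvents p).getLast? with
        | none =>
          have hpnil : pvEvents p = [] := List.getLast?_eq_none_iff.mp hlast
          have hcur : (p.foldl pvStepLine pvInit).current = none := by
            rw [h2, hlast]; rfl
          simp only [hcur, Option.elim_none]
          rw [h5 L, hpnil, hE, hpnil]
          simp
        | some e =>
          have hcur : (p.foldl pvStepLine pvInit).current = some e.2 := by
            rw [h2, hlast]; rfl
          simp only [hcur, Option.elim_some]
          rw [PySem.Dict.get?_insert, hE,
            pv_zip_tail_snoc (pvEvents p) e ((p.length : Int), lab) hlast,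
            List.find?_append]
          obtain ⟨n, hn1, hn2⟩ := pv_events_shape p e (List.mem_of_getLast? hlast)
          by_cases hLe : L = e.2
          · rw [if_pos hLe]
            have hnone : ((pvEvents p).zip ((pvEvents p).drop 1)).find?
                (fun q => q.1.2 == L) = none := by
              rw [List.find?_eq_none]
              intro q hq hbeq
              have hql : q.1 ∈ (pvEvents p).dropLast := pv_mem_zip_adj_fst _ q hq
              have hne : pvEvents p ≠ [] := by
                intro h0; rw [h0] at hlast; cases hlast
              have hgl : (pvEvents p).getLast hne = e :=
                Option.some.inj ((List.getLast?_eq_some_getLast hne).symm.trans hlast)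
              have hsplit : (pvEvents p).dropLast ++ [e] = pvEvents p := by
                rw [← hgl]; exact List.dropLast_concat_getLast hne
              have hnd2 := hndp
              rw [← hsplit, List.map_append] at hnd2
              have hdisj := (List.nodup_append.mp hnd2).2.2
              have hqlab : q.1.2 = e.2 := by rw [beq_iff_eq.mp hbeq, hLe]
              exact (hdisj _ (List.mem_map.mpr ⟨q.1, hql, hqlab⟩) e.2 (by simp)) rfl
            rw [hnone]
            have hsing : ([(e, ((p.length : Int), lab))]).find?
                (fun q => q.1.2 == L) = some (e, ((p.length : Int), lab)) := by
              simp [hLe]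
            rw [hsing]
            simp only [Option.none_or, Option.map_some]
            rw [h3, hlast]
            simp only [hn1]
            rw [pv_content_stable p x n p.length (le_refl _)]
          · rw [if_neg hLe]
            have hsing : ([(e, ((p.length : Int), lab))]).find?
                (fun q => q.1.2 == L) = none := by
              simp [beq_eq_false_iff_ne.mpr (fun h => hLe h.symm)]
            rw [hsing, Option.or_none, h5 L]
            cases hfind : ((pvEvents p).zip ((pvEvents p).drop 1)).find?
                (fun q => q.1.2 == L) with
            | none => rfl
            | some q =>
              have hq := List.mem_of_find?_eq_some hfind
              have hq1 : q.1 ∈ pvEvents p := (List.of_mem_zip hq).1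
              have hq2 : q.2 ∈ (pvEvents p).drop 1 := (List.of_mem_zip hq).2
              obtain ⟨n', hn1', _⟩ := pv_events_shape p q.1 hq1
              obtain ⟨m, hm1, hm2⟩ := pv_events_shape p q.2 ((List.drop_sublist 1 _).subset hq2)
              simp only [Option.map_some, hn1', hm1]
              rw [pv_content_stable p x n' m (by omega)]

-- ---- assembling port B's result from the invariant ----

theorem pv_zip_ends (ss : List String) (e : Int × String)
    (hlast : (pvEvents ss).getLast? = some e) :
    (pvEvents ss).zip (pvEnds ss)
      = (((pvEvents ss).zip ((pvEvents ss).drop 1)).map (fun q => (q.1, q.2.1)))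
        ++ [(e, (ss.length : Int))] := by
  have hne : pvEvents ss ≠ [] := by intro h0; rw [h0] at hlast; cases hlast
  have hgl : (pvEvents ss).getLast hne = e :=
    Option.some.inj ((List.getLast?_eq_some_getLast hne).symm.trans hlast)
  have hsplit : (pvEvents ss).dropLast ++ [e] = pvEvents ss := by
    rw [← hgl]; exact List.dropLast_concat_getLast hne
  have hadj : (pvEvents ss).zip ((pvEvents ss).drop 1)
      = (pvEvents ss).dropLast.zip ((pvEvents ss).drop 1) := by
    conv_lhs => rw [← hsplit, pv_zip_adj_fst, hsplit]
  have hlen : ((pvEvents ss).dropLast).length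
      = (((pvEvents ss).drop 1).map (fun q : Int × String => q.1)).length := by
    simp
  unfold pvEnds
  nth_rewrite 1 [← hsplit]
  rw [List.zip_append hlen, List.zip_map_right, ← hadj]
  congr 1

theorem pv_sect_last (ss : List String) (hnd : ((pvEvents ss).map (·.2)).Nodup)
    (e : Int × String) (hlast : (pvEvents ss).getLast? = some e) (L : String) :
    (((ss.foldl pvStepLine pvInit).sections.insert e.2
        ((ss.foldl pvStepLine pvInit).buf)).get? L)
      = (((pvEvents ss).zip (pvEnds ss)).find? (fun pe => pe.1.2 == L)).map
          (fun pe => pvContent ss pe.1.1 pe.2) := by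
  obtain ⟨h1, h2, h3, h4, h5⟩ := pv_inv ss hnd
  have hne : pvEvents ss ≠ [] := by intro h0; rw [h0] at hlast; cases hlast
  have hgl : (pvEvents ss).getLast hne = e :=
    Option.some.inj ((List.getLast?_eq_some_getLast hne).symm.trans hlast)
  have hsplit : (pvEvents ss).dropLast ++ [e] = pvEvents ss := by
    rw [← hgl]; exact List.dropLast_concat_getLast hne
  obtain ⟨n, hn1, hn2⟩ := pv_events_shape ss e (List.mem_of_getLast? hlast)
  rw [PySem.Dict.get?_insert, pv_zip_ends ss e hlast, List.find?_append, List.find?_map]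
  have hcomp : ((fun pe : (Int × String) × Int => pe.1.2 == L) ∘
      (fun q : (Int × String) × (Int × String) => (q.1, q.2.1)))
      = (fun q : (Int × String) × (Int × String) => q.1.2 == L) := by
    funext q; rfl
  rw [hcomp]
  by_cases hLe : L = e.2
  · rw [if_pos hLe]
    have hnone : ((pvEvents ss).zip ((pvEvents ss).drop 1)).find?
        (fun q => q.1.2 == L) = none := by
      rw [List.find?_eq_none]
      intro q hq hbeq
      have hql : q.1 ∈ (pvEvents ss).dropLast := pv_mem_zip_adj_fst _ q hq
      have hnd2 := hnd
      rw [← hsplit, List.map_append] at hnd2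
      have hdisj := (List.nodup_append.mp hnd2).2.2
      have hqlab : q.1.2 = e.2 := by rw [beq_iff_eq.mp hbeq, hLe]
      exact (hdisj _ (List.mem_map.mpr ⟨q.1, hql, hqlab⟩) e.2 (by simp)) rfl
    rw [hnone]
    have hsing : ([(e, (ss.length : Int))]).find? (fun pe => pe.1.2 == L)
        = some (e, (ss.length : Int)) := by
      simp [hLe]
    simp only [Option.map_none, Option.none_or, hsing, Option.map_some]
    rw [h3, hlast]
  · rw [if_neg hLe]
    have hsing : ([(e, (ss.length : Int))]).find? (fun pe => pe.1.2 == L) = none := by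
      simp [beq_eq_false_iff_ne.mpr (fun h => hLe h.symm)]
    rw [hsing, h5 L]
    cases hfind : ((pvEvents ss).zip ((pvEvents ss).drop 1)).find?
        (fun q => q.1.2 == L) with
    | none => rfl
    | some q => simp

theorem pv_val_of_find (ss : List String) (o : Option ((Int × String) × Int)) :
    (if ((o.map (fun pe => pvContent ss pe.1.1 pe.2)).getD []).isEmpty then none
     else some (PySem.Str.join "\n"
        ((o.map (fun pe => pvContent ss pe.1.1 pe.2)).getD [])))
      = (o.map (pvVal ss)).getD none := by
  cases o with
  | none => rfl
  | some pe => simp [pvVal]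

theorem pv_first_strip (raws : List String) :
    PySem.Str.strip (PySem.List.pyGetD raws 0 "") =
      PySem.List.pyGetD (raws.map PySem.Str.strip) 0 "" := by
  cases raws with
  | nil => decide
  | cons r t =>
    have h0 : ∀ (l : List String) (a : String), PySem.List.pyGetD (a :: l) 0 "" = a := by
      intro l a
      have := PySem.List.pyGetD_natCast (a :: l) 0 ""
      simpa using this
    rw [List.map_cons, h0, h0]

theorem pv_alt_eq (s : String)
    (hnd : ((pvEvents (((PySem.Str.split? s "\n").getD []).map PySem.Str.strip)).map
      (·.2)).Nodup) :
    parse_sop_section_alt s = pvAltSpec s := by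
  simp only [parse_sop_section_alt, pvAltSpec]
  have hfold : ((PySem.Str.split? s "\n").getD []).foldl pvStep pvInit
      = (((PySem.Str.split? s "\n").getD []).map PySem.Str.strip).foldl pvStepLine pvInit := by
    rw [List.foldl_map]
    rfl
  rw [hfold]
  set ss : List String := ((PySem.Str.split? s "\n").getD []).map PySem.Str.strip with hss
  obtain ⟨h1, h2, h3, h4, h5⟩ := pv_inv ss hnd
  rw [h1, pv_isEmpty_filter]
  by_cases hany : (ss.any (fun t => !(t == ""))) = true
  · rw [hany]
    have hneg : ¬((!true) = true) := by simp
    rw [if_neg hneg, if_neg hneg]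
    have hTitle : (ss.foldl pvStepLine pvInit).title.getD
        (PySem.Str.strip (PySem.List.pyGetD ((PySem.Str.split? s "\n").getD []) 0 ""))
        = pvTitle ss := by
      rw [h4]
      cases hfind : (pvEvents ss).find? (fun e => e.2 == "Module") with
      | none =>
        simp only [Option.map_none, Option.getD_none]
        unfold pvTitle
        rw [hfind]
        simp only [Option.map_none]
        rw [pv_first_strip, ← hss]
      | some e =>
        simp only [Option.map_some, Option.getD_some]
        unfold pvTitle
        rw [hfind]
        rfl
    rw [hTitle]
    cases hlast : (pvEvents ss).getLast? with
    | none =>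
      have hpnil : pvEvents ss = [] := List.getLast?_eq_none_iff.mp hlast
      have hcur : (ss.foldl pvStepLine pvInit).current = none := by
        rw [h2, hlast]; rfl
      rw [hcur]
      simp only [Option.elim_none]
      have hsect : ∀ L : String, (ss.foldl pvStepLine pvInit).sections.get? L = none := by
        intro L
        rw [h5 L, hpnil]
        rfl
      have hspec : ∀ L : String, (pvSections ss).get? L = none := by
        intro L
        rw [pv_sections_get? ss hnd L, hpnil]
        rfl
      rw [hsect "Overview", hsect "Preconditions", hsect "Resolution",
        hsect "Verification", hsect "Module", hspec "Overview", hspec "Preconditions",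
        hspec "Resolution", hspec "Verification", hspec "Module"]
      rfl
    | some e =>
      have hcur : (ss.foldl pvStepLine pvInit).current = some e.2 := by
        rw [h2, hlast]; rfl
      rw [hcur]
      simp only [Option.elim_some]
      rw [pv_sect_last ss hnd e hlast "Overview", pv_sect_last ss hnd e hlast "Preconditions",
        pv_sect_last ss hnd e hlast "Resolution", pv_sect_last ss hnd e hlast "Verification",
        pv_sect_last ss hnd e hlast "Module"]
      rw [pv_val_of_find, pv_val_of_find, pv_val_of_find, pv_val_of_find, pv_val_of_find]
      rw [pv_sections_get? ss hnd "Overview", pv_sections_get? ss hnd "Preconditions",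
        pv_sections_get? ss hnd "Resolution", pv_sections_get? ss hnd "Verification",
        pv_sections_get? ss hnd "Module"]
      cases hM : ((pvEvents ss).zip (pvEnds ss)).find? (fun pe => pe.1.2 == "Module") with
      | none => rfl
      | some pe =>
        simp only [Option.map_some, Option.getD_some]
        cases hv : pvVal ss pe with
        | none => rfl
        | some m => rfl
  · have hf : (ss.any (fun t => !(t == ""))) = false := by simpa using hany
    rw [hf]
    rfl

-- ---- the verdict's engine ----

theorem pv_main (s : String) (hpre : Pre_parse_sop_section s) :
    parse_sop_section s = parse_sop_section_alt s := by
  have hcnt : ∀ w ∈ ["module", "overview", "preconditions", "resolution", "verification"],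
      ((((PySem.Str.split? s "\n").getD []).map PySem.Str.strip).map
        PySem.Str.lower).count w ≤ 1 := by
    intro w hw
    have h1 := hpre w hw
    unfold pvStrippedLower at h1
    rw [List.map_map]
    exact h1
  have hnd := pv_labels_nodup _ hcnt
  rw [pv_A_eq s hpre, pv_alt_eq s hnd]

-- ===== VERDICT (by name: the statement is the Claim_ definition above) =====
theorem parse_sop_section_spec : Claim_equal_parse_sop_section := by
  intro s _ hpre
  unfold Spec_parse_sop_section
  exact pv_main s hpre
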